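-- pv_equiv track=rewrite | github.com/PiusLim373/CasinoArmServer | myproject/app/init3WithFaceRecog.py | EndGame
-- ===== SOURCE A (Python) =====
-- def EndGame(value1, value2, value3, value0):
-- 	ValueArrAlias = ['Player 1', 'Player 2', 'Player 3', 'Dealer']
-- 	ValueArr = [int(value1), int(value2), int(value3), int(value0)]
-- 	Winner = []
-- 	i = 0
-- 	j = 0
-- 	while i < len(ValueArr):
-- 		if ValueArr[i] > 21:
-- 			ValueArr[i] = 0
-- 		i += 1
-- 	x = max(ValueArr)
-- 	if x != 0:
-- 		while j < len(ValueArr):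
-- 			if ValueArr[j] == x:
-- 				Winner.append(ValueArrAlias[j])
-- 			j += 1
-- 		return Winner
-- 	else:
-- 		return Winner
-- ===== SOURCE B (Python) =====
-- def EndGame(value1, value2, value3, value0):
--     pairs = [('Player 1', value1), ('Player 2', value2),
--              ('Player 3', value3), ('Dealer', value0)]
--     first_alias, first_value = pairs[0]
--     best = 0 if int(first_value) > 21 else int(first_value)
--     winners = [first_alias]
--     for alias, value in pairs[1:]:
--         score = 0 if int(value) > 21 else int(value)
--         if score > best:
--             best = score
--             winners = [alias]
--         elif score == best:
--             winners.append(alias)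
--     return winners if best != 0 else []
-- ===== Notes on version B (the rewrite author's own statement) =====
-- stated objective: simpler
-- what changed: Single pass over (alias, value) pairs maintaining a running best and winners list, instead of A's three separate index loops (cap loop, max, collect loop) over a mutated array.
import Mathlib
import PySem

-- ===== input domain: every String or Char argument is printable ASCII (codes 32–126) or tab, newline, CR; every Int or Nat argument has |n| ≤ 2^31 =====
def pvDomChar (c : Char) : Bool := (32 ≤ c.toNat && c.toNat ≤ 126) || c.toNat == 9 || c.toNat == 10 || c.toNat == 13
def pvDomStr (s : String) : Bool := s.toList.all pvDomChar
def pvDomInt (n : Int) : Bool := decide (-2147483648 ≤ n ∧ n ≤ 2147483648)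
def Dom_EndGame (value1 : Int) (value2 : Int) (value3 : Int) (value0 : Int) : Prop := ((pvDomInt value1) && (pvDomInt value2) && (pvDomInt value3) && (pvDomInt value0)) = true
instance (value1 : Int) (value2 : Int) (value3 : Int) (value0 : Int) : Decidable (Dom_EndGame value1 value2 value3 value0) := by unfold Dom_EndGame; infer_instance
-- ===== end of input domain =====

-- ===== PORT A =====
-- B is a single accumulator pass instead of A's cap-loop + max + collect-loop (objective: simpler).
-- Port of A: cap loop over the array, max of the capped array, then a collect loop over index/alias pairs.
def EndGame (value1 : Int) (value2 : Int) (value3 : Int) (value0 : Int) : List String :=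
  let aliases : List String := ["Player 1", "Player 2", "Player 3", "Dealer"]
  let arr0 : List Int := [value1, value2, value3, value0]
  -- the first while loop: ValueArr[i] := 0 when > 21, element by element
  let arr : List Int := arr0.map (fun v => if v > 21 then (0 : Int) else v)
  -- x = max(ValueArr); the list is literally nonempty so Python's max returns
  let x : Int := (PySem.List.max? arr (fun v => v)).getD 0
  if x ≠ 0 then
    -- second while loop: append aliases[j] when ValueArr[j] == x
    (aliases.zip arr).foldl (fun w p => if p.2 = x then w ++ [p.1] else w) []
  else []

-- ===== PORT B =====
def EndGame_altStep (st : Int × List String) (p : String × Int) : Int × List String :=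
  let score : Int := if p.2 > 21 then 0 else p.2
  if score > st.1 then (score, [p.1])
  else if score = st.1 then (st.1, st.2 ++ [p.1])
  else st

def EndGame_alt (value1 : Int) (value2 : Int) (value3 : Int) (value0 : Int) : List String :=
  let best0 : Int := if value1 > 21 then 0 else value1
  let r := [("Player 2", value2), ("Player 3", value3),
            ("Dealer", value0)].foldl EndGame_altStep (best0, ["Player 1"])
  if r.1 ≠ 0 then r.2 else []

-- ===== PRECONDITION & SPEC =====
def Spec_EndGame (value1 : Int) (value2 : Int) (value3 : Int) (value0 : Int) (out : List String) : Prop := out = EndGame_alt value1 value2 value3 value0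
instance (value1 : Int) (value2 : Int) (value3 : Int) (value0 : Int) (out : List String) : Decidable (Spec_EndGame value1 value2 value3 value0 out) := by unfold Spec_EndGame; infer_instance

-- ===== CLAIM (what is proved, stated in full; the proofs are below) =====
def Claim_equal_EndGame : Prop := ∀ (value1 : Int) (value2 : Int) (value3 : Int) (value0 : Int), Dom_EndGame value1 value2 value3 value0 → Spec_EndGame value1 value2 value3 value0 (EndGame value1 value2 value3 value0)

-- ===== LEMMAS AND PROOFS =====
-- Characterization of B's single pass: the accumulator holds the running maximum of the
-- capped scores, and the winners list is exactly the aliases whose capped score equals it.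
theorem fold_char (ps : List (String × Int)) (b : Int) (w : List String) :
    ps.foldl EndGame_altStep (b, w) =
      (ps.foldl (fun m p => max m (if p.2 > 21 then 0 else p.2)) b,
        (if b = ps.foldl (fun m p => max m (if p.2 > 21 then 0 else p.2)) b then w else []) ++
          ((ps.map (fun q => (q.1, if q.2 > 21 then (0:Int) else q.2))).filter
            (fun q => decide (q.2 =
              ps.foldl (fun m p => max m (if p.2 > 21 then 0 else p.2)) b))).map Prod.fst) := by
  induction ps generalizing b w with
  | nil => simp
  | cons p t ih =>
    have hle := PySem.List.le_foldl_max_int t (fun q => if q.2 > 21 then 0 else q.2)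
    simp only [List.foldl, EndGame_altStep, List.map_cons, List.filter_cons, decide_eq_true_eq]
    by_cases h1 : (if p.2 > 21 then (0:Int) else p.2) > b
    · have hm : max b (if p.2 > 21 then (0:Int) else p.2) = (if p.2 > 21 then (0:Int) else p.2) := by omega
      rw [if_pos h1, ih]
      simp only [hm]
      have hbM : ¬ (b = List.foldl (fun m q => max m (if q.2 > 21 then 0 else q.2)) (if p.2 > 21 then (0:Int) else p.2) t) := by
        have := (hle (if p.2 > 21 then (0:Int) else p.2)).1
        omega
      rw [if_neg hbM]
      by_cases hc : (if p.2 > 21 then (0:Int) else p.2) = List.foldl (fun m q => max m (if q.2 > 21 then 0 else q.2)) (if p.2 > 21 then (0:Int) else p.2) t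
      · simp only [if_pos hc]; simp
      · simp only [if_neg hc]
    · rw [if_neg h1]
      by_cases h2 : (if p.2 > 21 then (0:Int) else p.2) = b
      · rw [if_pos h2, ih]
        simp only [h2, max_self]
        by_cases hc : b = List.foldl (fun m q => max m (if q.2 > 21 then 0 else q.2)) b t
        · simp only [if_pos hc]; simp
        · simp only [if_neg hc]
      · have hm : max b (if p.2 > 21 then (0:Int) else p.2) = b := by omega
        rw [if_neg h2, ih]
        simp only [hm]
        have hc : ¬ ((if p.2 > 21 then (0:Int) else p.2) = List.foldl (fun m q => max m (if q.2 > 21 then 0 else q.2)) b t) := by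
          have := (hle b).1
          omega
        rw [if_neg hc]

-- ===== VERDICT (by name: the statement is the Claim_ definition above) =====
set_option maxHeartbeats 2000000 in
theorem EndGame_spec : Claim_equal_EndGame := by
  intro v1 v2 v3 v0 _
  unfold Spec_EndGame EndGame EndGame_alt
  simp only [List.map_cons, List.map_nil]
  rw [fold_char]
  simp only [PySem.List.max?_id_cons, Option.getD, List.zip, List.zipWith, List.foldl,
    List.map_cons, List.map_nil, List.filter_cons, List.filter_nil, decide_eq_true_eq,
    List.nil_append]
  split_ifs <;> rfl
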